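-- pv_equiv track=rewrite | github.com/Louise-X10/delta-debugging | mods.py | apply_remove
-- ===== SOURCE A (Python) =====
-- def apply_remove(deltas, removed):
--     delta_dict = {idx: char for idx, char in deltas}
--     for start_idx, chars in removed:
--         for i in range(len(chars)):  # Remove each character from the given start index
--             if start_idx + i in delta_dict:
--                 # Check the deleted char is the one speficied by removed
--                 assert delta_dict[start_idx + i] == chars[i]
--                 del delta_dict[start_idx + i]
--     deltas = sorted(delta_dict.items())
--     return deltas
-- ===== SOURCE B (Python) =====
-- def apply_remove(deltas, removed):
--     # Probe the removal ranges arithmetically: the char removed at idx, per the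
--     # first range covering idx, or None if no range covers it.
--     def covering(idx):
--         for start, chars in removed:
--             if 0 <= idx - start < len(chars):
--                 return chars[idx - start]
--         return None
--
--     out = []
--     seen = set()
--     for idx, char in reversed(deltas):  # keep the last entry per index
--         if idx in seen:
--             continue
--         seen.add(idx)
--         c = covering(idx)
--         if c is None:
--             out.append((idx, char))
--         else:
--             assert char == c
--     return sorted(out)
-- ===== Notes on version B (the rewrite author's own statement) =====
-- stated objective: alternative
-- what changed: A expands every removal range into individual indices and deletes them from a dict of the deltas, then sorts the surviving items; B never builds a delta dict or expands a range: it scans the deltas in reverse keeping the last entry per index, probes the removal ranges arithmetically (first range whose interval covers the index) to decide survival and to check the same assert, and sorts the survivors.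
import Mathlib
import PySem

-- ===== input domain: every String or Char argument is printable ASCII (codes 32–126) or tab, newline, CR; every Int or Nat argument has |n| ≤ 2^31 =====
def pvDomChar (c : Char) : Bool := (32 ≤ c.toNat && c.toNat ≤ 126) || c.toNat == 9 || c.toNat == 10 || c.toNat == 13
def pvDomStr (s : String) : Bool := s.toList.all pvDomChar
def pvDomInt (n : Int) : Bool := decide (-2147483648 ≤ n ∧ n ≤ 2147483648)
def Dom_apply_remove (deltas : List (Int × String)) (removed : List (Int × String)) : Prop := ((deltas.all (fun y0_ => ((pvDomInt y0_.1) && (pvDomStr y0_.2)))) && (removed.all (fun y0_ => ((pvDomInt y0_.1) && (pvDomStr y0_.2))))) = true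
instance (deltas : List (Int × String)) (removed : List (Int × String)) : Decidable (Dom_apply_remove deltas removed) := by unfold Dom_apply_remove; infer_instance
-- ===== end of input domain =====

-- B probes the removal RANGES arithmetically per delta index (no expansion of ranges, no delta
-- dict: a reverse scan keeps the last entry per index) and sorts the survivors (objective:
-- alternative, same cost).
-- ===== PORT A =====
-- A's `assert delta_dict[start_idx+i] == chars[i]` only raises; the inputs on which it fires are excluded by Pre_, so the port performs the deletion directly.
def apply_remove (deltas : List (Int × String)) (removed : List (Int × String)) : List (Int × String) :=
  let delta_dict : PySem.Dict Int String :=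
    deltas.foldl (fun d p => d.insert p.1 p.2) PySem.Dict.empty
  let delta_dict :=
    removed.foldl (fun d p =>
      (PySem.List.pyRange 0 (PySem.Str.len p.2) 1).foldl (fun d i =>
        if (d.get? (p.1 + i)).isSome then d.erase (p.1 + i) else d) d) delta_dict
  PySem.List.sorted2 delta_dict.items (fun q => q.1) (fun q => q.2)

-- ===== PORT B =====
-- Source B's `covering(idx)`: the char removed at idx per the first range covering idx, else None
def pvCovering (removed : List (Int × String)) (idx : Int) : Option String :=
  removed.findSome? (fun p =>
    if 0 ≤ idx - p.1 ∧ idx - p.1 < PySem.Str.len p.2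
    then (PySem.Str.pyGet? p.2 (idx - p.1)).map (fun c => String.ofList [c]) else none)

-- Source B's main loop over reversed(deltas) with the `seen` set; its assert branch (covering
-- present) only raises or drops the entry — the raising inputs are outside Pre_
def pvScan (removed : List (Int × String)) (seen : PySem.Set Int) : List (Int × String) → List (Int × String)
  | [] => []
  | p :: rest =>
    if PySem.Set.contains seen p.1 then pvScan removed seen rest
    else if (pvCovering removed p.1).isNone then p :: pvScan removed (PySem.Set.add seen p.1) rest
    else pvScan removed (PySem.Set.add seen p.1) rest

def apply_remove_alt (deltas : List (Int × String)) (removed : List (Int × String)) : List (Int × String) :=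
  PySem.List.sorted2 (pvScan removed PySem.Set.empty deltas.reverse) (fun q => q.1) (fun q => q.2)

-- ===== PRECONDITION & SPEC =====
-- Pre_ excludes exactly the inputs on which the assert raises (in A and equally in B): those
-- where the last delta value stored at some index differs from the char the first covering
-- removal range specifies for that index.
def Pre_apply_remove (deltas : List (Int × String)) (removed : List (Int × String)) : Prop :=
  ∀ p ∈ deltas, ∀ s ∈ List.lookup p.1 deltas.reverse, ∀ c ∈ pvCovering removed p.1, s = c
instance (deltas : List (Int × String)) (removed : List (Int × String)) : Decidable (Pre_apply_remove deltas removed) := by unfold Pre_apply_remove; infer_instance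

def pvWitness_apply_remove : (List (Int × String)) × (List (Int × String)) :=
  ([(0, "a"), (2, "b")], [(0, "a")])

def Spec_apply_remove (deltas : List (Int × String)) (removed : List (Int × String)) (out : List (Int × String)) : Prop := out = apply_remove_alt deltas removed
instance (deltas : List (Int × String)) (removed : List (Int × String)) (out : List (Int × String)) : Decidable (Spec_apply_remove deltas removed out) := by unfold Spec_apply_remove; infer_instance

-- ===== CLAIM (what is proved, stated in full; the proofs are below) =====
def Claim_equal_apply_remove : Prop := ∀ (deltas : List (Int × String)) (removed : List (Int × String)), Dom_apply_remove deltas removed → Pre_apply_remove deltas removed → Spec_apply_remove deltas removed (apply_remove deltas removed)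

-- ===== LEMMAS AND PROOFS =====

-- ---- A side: the erase loop is a filter of the dict items ----

-- erasing an absent key is a no-op, so A's guarded delete is an unconditional erase
theorem pvIfErase (d : PySem.Dict Int String) (x : Int) :
    (if (d.get? x).isSome then d.erase x else d) = d.erase x := by
  split_ifs with h
  · rfl
  · apply PySem.Dict.ext
    show d.items = d.items.filter _
    symm
    apply List.filter_eq_self.mpr
    intro a ha
    simp only [PySem.Dict.get?, Option.isSome_map, Bool.not_eq_true,
      Option.isSome_eq_false_iff, Option.isNone_iff_eq_none, List.find?_eq_none] at h
    simpa using h a ha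

-- a fold of erases filters out all the erased keys
theorem pvFoldErase (L : List Int) (d : PySem.Dict Int String) :
    (L.foldl (fun d k => d.erase k) d).items = d.items.filter (fun q => !(L.contains q.1)) := by
  induction L generalizing d with
  | nil => simp
  | cons k L ih =>
    rw [List.foldl_cons, ih]
    show (d.items.filter _).filter _ = _
    rw [List.filter_filter]
    apply List.filter_congr
    intro a _
    by_cases hak : a.1 = k <;> simp [hak, Bool.and_comm]

-- the removed-index lists generated per removal entry
def pvKs (p : Int × String) : List Int :=
  (PySem.List.pyRange 0 (PySem.Str.len p.2) 1).map (fun i => p.1 + i)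

theorem pvA_dict (removed : List (Int × String)) (d : PySem.Dict Int String) :
    removed.foldl (fun d p =>
      (PySem.List.pyRange 0 (PySem.Str.len p.2) 1).foldl (fun d i =>
        if (d.get? (p.1 + i)).isSome then d.erase (p.1 + i) else d) d) d
    = (removed.flatMap pvKs).foldl (fun d k => d.erase k) d := by
  rw [List.foldl_flatMap]
  congr 1
  funext d p
  simp only [pvIfErase, pvKs, List.foldl_map]

-- ---- the covering probe finds a range iff the expanded index list contains the index ----

theorem pvCoveringSome (removed : List (Int × String)) (k : Int) :
    (pvCovering removed k).isSome = (removed.flatMap pvKs).contains k := by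
  induction removed with
  | nil => simp [pvCovering]
  | cons p rest ih =>
    rw [pvCovering, List.findSome?_cons]
    rw [List.flatMap_cons, List.contains_append]
    have hrest : (List.findSome? (fun p =>
        if 0 ≤ k - p.1 ∧ k - p.1 < PySem.Str.len p.2
        then (PySem.Str.pyGet? p.2 (k - p.1)).map (fun c => String.ofList [c]) else none) rest)
        = pvCovering rest k := rfl
    by_cases hc : 0 ≤ k - p.1 ∧ k - p.1 < PySem.Str.len p.2
    · rw [if_pos hc]
      have hin : PySem.Str.pyGet? p.2 (k - p.1) ≠ none := by
        rw [PySem.Str.pyGet?, PySem.Chars.pyGet?, Ne, PySem.List.pyGet?_eq_none_iff]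
        rw [PySem.Str.len_eq] at hc
        simp only [PySem.Raise.InRange, not_and, not_lt, not_le, Classical.not_imp]
        exact ⟨by omega, by omega⟩
      rcases Option.ne_none_iff_exists'.mp hin with ⟨c, hcc⟩
      have hmem : (pvKs p).contains k = true := by
        simp only [pvKs, List.contains_eq_any_beq, List.any_eq_true, List.mem_map]
        exact ⟨k, ⟨k - p.1, PySem.List.mem_pyRange_one.mpr ⟨hc.1, hc.2⟩, by omega⟩, by simp⟩
      rw [hcc, hmem]
      simp
    · have hno : (pvKs p).contains k = false := by
        simp only [pvKs, List.contains_eq_any_beq, List.any_eq_false]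
        intro x hx
        obtain ⟨i, hi, rfl⟩ := List.mem_map.mp hx
        rw [PySem.List.mem_pyRange_one] at hi
        simp only [beq_iff_eq]
        omega
      rw [if_neg hc, hrest, ih]
      rw [hno, Bool.false_or]

-- ---- the insert loop looked up = last binding in deltas ----

theorem pvGetFold (deltas : List (Int × String)) (d : PySem.Dict Int String) (k : Int) :
    (deltas.foldl (fun d p => d.insert p.1 p.2) d).get? k
      = (List.lookup k deltas.reverse).or (d.get? k) := by
  induction deltas generalizing d with
  | nil => simp
  | cons p rest ih =>
    rw [List.foldl_cons, ih, List.reverse_cons, List.lookup_append, Option.or_assoc]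
    congr 1
    rw [PySem.Dict.get?_insert, show List.lookup k [p] = List.lookup k [(p.1, p.2)] from rfl,
      List.lookup_cons]
    by_cases hb : k = p.1
    · simp [hb]
    · simp only [show (k == p.1) = false by simp [hb]]
      simp
      exact fun h => absurd h hb

theorem pvNodupKeysA (deltas : List (Int × String)) :
    (deltas.foldl (fun d p => d.insert p.1 p.2) (PySem.Dict.empty : PySem.Dict Int String)).keys.Nodup := by
  exact PySem.Dict.nodup_keys_foldl_insert_key deltas Prod.fst (fun _ a => a.2) _ PySem.Dict.nodup_keys_empty

-- ---- B side: membership in the reverse-scan output ----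

theorem pvContainsAdd (s : PySem.Set Int) (x k : Int) :
    PySem.Set.contains (PySem.Set.add s x) k = (PySem.Set.contains s k || k == x) := by
  simp only [PySem.Set.contains, PySem.Set.add]
  split_ifs with h
  · by_cases hk : k = x <;> simp_all
  · by_cases hk : k = x <;> simp [hk]

theorem pvMemScan (removed : List (Int × String)) (seen : PySem.Set Int)
    (l : List (Int × String)) (k : Int) (v : String) :
    (k, v) ∈ pvScan removed seen l ↔
      List.lookup k l = some v ∧ PySem.Set.contains seen k = false ∧ (pvCovering removed k).isNone := by
  induction l generalizing seen with
  | nil => simp [pvScan]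
  | cons p rest ih =>
    rw [pvScan, show List.lookup k (p :: rest) = List.lookup k ((p.1, p.2) :: rest) from rfl,
      List.lookup_cons]
    by_cases hk : k = p.1
    · rw [show (k == p.1) = true by simp [hk]]
      by_cases hs : PySem.Set.contains seen p.1
      · rw [if_pos hs, ih]
        have hsk : PySem.Set.contains seen k = true := by rw [hk]; exact hs
        constructor
        · rintro ⟨_, hcf, _⟩; rw [hsk] at hcf; cases hcf
        · rintro ⟨_, hcf, _⟩; rw [hsk] at hcf; cases hcf
      · have hsk : PySem.Set.contains seen k = false := by
          rw [hk]; exact Bool.not_eq_true _ ▸ hs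
        rw [if_neg hs]
        by_cases hc : (pvCovering removed p.1).isNone
        · rw [if_pos hc, List.mem_cons, ih, pvContainsAdd]
          have hck : (pvCovering removed k).isNone := by rw [hk]; exact hc
          constructor
          · rintro (h | ⟨_, hcf, _⟩)
            · subst h; exact ⟨rfl, hsk, hck⟩
            · rw [show (k == p.1) = true by simp [hk]] at hcf; simp at hcf
          · rintro ⟨hv, _, _⟩
            injection hv with hv
            exact Or.inl (by rw [hk, ← hv])
        · rw [if_neg hc, ih, pvContainsAdd]
          have hck : ¬ (pvCovering removed k).isNone := by rw [hk]; exact hc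
          constructor
          · rintro ⟨_, hcf, _⟩
            rw [show (k == p.1) = true by simp [hk]] at hcf; simp at hcf
          · rintro ⟨_, _, hcf⟩; exact absurd hcf hck
    · rw [show (k == p.1) = false by simp [hk]]
      by_cases hs : PySem.Set.contains seen p.1
      · rw [if_pos hs, ih]
      · rw [if_neg hs]
        have hadd : PySem.Set.contains (PySem.Set.add seen p.1) k = PySem.Set.contains seen k := by
          rw [pvContainsAdd, show (k == p.1) = false by simp [hk], Bool.or_false]
        by_cases hc : (pvCovering removed p.1).isNone
        · rw [if_pos hc, List.mem_cons, ih, hadd]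
          constructor
          · rintro (h | h)
            · exact absurd (congrArg Prod.fst h) hk
            · exact h
          · exact Or.inr
        · rw [if_neg hc, ih, hadd]

theorem pvNodupScan (removed : List (Int × String)) (seen : PySem.Set Int) (l : List (Int × String)) :
    ((pvScan removed seen l).map Prod.fst).Nodup := by
  induction l generalizing seen with
  | nil => simp [pvScan]
  | cons p rest ih =>
    rw [pvScan]
    by_cases hs : PySem.Set.contains seen p.1
    · rw [if_pos hs]; exact ih seen
    · rw [if_neg hs]
      by_cases hc : (pvCovering removed p.1).isNone
      · rw [if_pos hc, List.map_cons, List.nodup_cons]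
        refine ⟨?_, ih _⟩
        intro hmem
        obtain ⟨q, hq, hq1⟩ := List.mem_map.mp hmem
        have := ((pvMemScan removed _ rest q.1 q.2).mp (by simpa using hq)).2.1
        rw [hq1, pvContainsAdd] at this
        simp at this
      · rw [if_neg hc]; exact ih _

-- ---- sorted2 on lists with pairwise-distinct first components ----

def pvLt (a b : Int × String) : Bool :=
  decide (a.1 < b.1) || (!decide (b.1 < a.1) && decide (a.2 < b.2))

theorem pvSorted2Eq (xs : List (Int × String)) :
    PySem.List.sorted2 xs (fun q => q.1) (fun q => q.2)
      = xs.foldl (fun acc x => PySem.List.insertBy pvLt x acc) [] := rfl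

theorem pvInsertByNil (x : Int × String) : PySem.List.insertBy pvLt x [] = [x] := rfl
theorem pvInsertByCons (x y : Int × String) (ys : List (Int × String)) :
    PySem.List.insertBy pvLt x (y :: ys)
      = if pvLt x y then x :: y :: ys else y :: PySem.List.insertBy pvLt x ys := rfl

theorem pvInsertByPairwise (x : Int × String) (acc : List (Int × String))
    (hacc : acc.Pairwise (fun a b => a.1 < b.1)) (hx : ∀ y ∈ acc, x.1 ≠ y.1) :
    (PySem.List.insertBy pvLt x acc).Pairwise (fun a b => a.1 < b.1) := by
  induction acc with
  | nil => simp [pvInsertByNil]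
  | cons y ys ih =>
    rw [pvInsertByCons]
    have hxy : x.1 ≠ y.1 := hx y List.mem_cons_self
    obtain ⟨hhead, htail⟩ := List.pairwise_cons.mp hacc
    by_cases hlt : pvLt x y
    · rw [if_pos hlt]
      have h1 : x.1 < y.1 := by
        rcases Bool.or_eq_true_iff.mp hlt with h | h
        · exact of_decide_eq_true h
        · have h3 : ¬ (y.1 < x.1) := by simpa using (Bool.and_eq_true_iff.mp h).1
          omega
      refine List.pairwise_cons.mpr ⟨?_, hacc⟩
      intro z hz
      rcases List.mem_cons.mp hz with rfl | hz
      · exact h1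
      · exact lt_trans h1 (hhead z hz)
    · rw [if_neg hlt]
      have h1 : y.1 < x.1 := by
        have h3 : ¬ (x.1 < y.1) := by
          intro hxl
          exact hlt (Bool.or_eq_true_iff.mpr (Or.inl (decide_eq_true hxl)))
        omega
      refine List.pairwise_cons.mpr ⟨?_, ih htail (fun z hz => hx z (List.mem_cons_of_mem _ hz))⟩
      intro z hz
      rcases (PySem.List.mem_insertBy pvLt x z ys).mp hz with rfl | hz
      · exact h1
      · exact hhead z hz

theorem pvFoldInsertPairwise (xs acc : List (Int × String))
    (hacc : acc.Pairwise (fun a b => a.1 < b.1))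
    (hdisj : ∀ p ∈ xs, ∀ y ∈ acc, p.1 ≠ y.1)
    (hnd : (xs.map Prod.fst).Nodup) :
    (xs.foldl (fun acc x => PySem.List.insertBy pvLt x acc) acc).Pairwise (fun a b => a.1 < b.1) := by
  induction xs generalizing acc with
  | nil => exact hacc
  | cons x xs ih =>
    rw [List.foldl_cons]
    rw [List.map_cons, List.nodup_cons] at hnd
    refine ih _ (pvInsertByPairwise x acc hacc (hdisj x List.mem_cons_self)) ?_ hnd.2
    intro p hp y hy
    rcases (PySem.List.mem_insertBy pvLt x y acc).mp hy with rfl | hy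
    · intro h
      exact hnd.1 (List.mem_map.mpr ⟨p, hp, h⟩)
    · exact hdisj p (List.mem_cons_of_mem _ hp) y hy

theorem pvSorted2Pairwise (xs : List (Int × String)) (h : (xs.map Prod.fst).Nodup) :
    (PySem.List.sorted2 xs (fun q => q.1) (fun q => q.2)).Pairwise (fun a b => a.1 < b.1) := by
  rw [pvSorted2Eq]
  exact pvFoldInsertPairwise xs [] (by simp) (by simp) h

theorem pvStrictEq (l1 l2 : List (Int × String)) (hp : l1.Perm l2)
    (h1 : l1.Pairwise (fun a b => a.1 < b.1)) (h2 : l2.Pairwise (fun a b => a.1 < b.1)) :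
    l1 = l2 := by
  exact List.Perm.eq_of_pairwise (fun a b _ _ h h' => absurd (lt_trans h h') (lt_irrefl _)) h1 h2 hp

-- ===== VERDICT (by name: the statement is the Claim_ definition above) =====
theorem apply_remove_spec : Claim_equal_apply_remove := by
  intro deltas removed _ _
  unfold Spec_apply_remove apply_remove apply_remove_alt
  simp only [pvA_dict]
  set D : PySem.Dict Int String := deltas.foldl (fun d p => d.insert p.1 p.2) PySem.Dict.empty with hD
  set LA := ((removed.flatMap pvKs).foldl (fun d k => d.erase k) D).items with hLA
  set LB := pvScan removed PySem.Set.empty deltas.reverse with hLB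
  have hLA' : LA = D.items.filter (fun q => !((removed.flatMap pvKs).contains q.1)) :=
    pvFoldErase _ _
  have hNA : (LA.map Prod.fst).Nodup := by
    rw [hLA']
    exact (pvNodupKeysA deltas).sublist (List.filter_sublist.map Prod.fst)
  have hNB : (LB.map Prod.fst).Nodup := pvNodupScan removed _ _
  have hperm : LA.Perm LB := by
    rw [List.perm_ext_iff_of_nodup hNA.of_map hNB.of_map]
    rintro ⟨k, v⟩
    rw [hLA', List.mem_filter, pvMemScan]
    have hget : ((k, v) ∈ D.items) ↔ List.lookup k deltas.reverse = some v := by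
      rw [← PySem.Dict.get?_eq_some_iff_mem_items D k v (pvNodupKeysA deltas), hD, pvGetFold]
      simp
    rw [hget]
    have hcov : (!((removed.flatMap pvKs).contains k)) = (pvCovering removed k).isNone := by
      rw [← pvCoveringSome]
      cases pvCovering removed k <;> rfl
    constructor
    · rintro ⟨h1, h2⟩
      refine ⟨h1, rfl, ?_⟩
      rw [← hcov, h2]
    · rintro ⟨h1, _, h3⟩
      exact ⟨h1, by rw [hcov, h3]⟩
  exact (pvStrictEq _ _ ((PySem.List.sorted2_perm LA _ _ _).trans
      (hperm.trans (PySem.List.sorted2_perm LB _ _ _).symm))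
    (pvSorted2Pairwise LA hNA) (pvSorted2Pairwise LB hNB))
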